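-- pv_equiv track=rewrite | github.com/sacmad21/whatsAgency | campaign/actions/creatives/prepare_multimedia_assets.py | parse_multimedia_block
-- ===== SOURCE A (Python) =====
-- def parse_multimedia_block(block: str) -> list:
--     """
--     Parses OpenAI response to structured MediaAsset list.
--     """
--     assets = []
--     current = {}
--     lines = block.strip().split("\n")
--     for line in lines:
--         if line.startswith("Type:"):
--             if current:
--                 assets.append(current)
--                 current = {}
--             current["type"] = line.split(":", 1)[1].strip()
--         elif line.startswith("Title:"):
--             current["title"] = line.split(":", 1)[1].strip()
--         elif line.startswith("Concept:"):
--             current["concept"] = line.split(":", 1)[1].strip()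
--         elif line.startswith("Engagement Tip:"):
--             current["engagement_tip"] = line.split(":", 1)[1].strip()
--         elif line.startswith("Mobile Optimization Tip:"):
--             current["mobile_tip"] = line.split(":", 1)[1].strip()
--     if current:
--         assets.append(current)
--     return assets
-- ===== SOURCE B (Python) =====
-- _TABLE = [
--     ("Type:", "type"),
--     ("Title:", "title"),
--     ("Concept:", "concept"),
--     ("Engagement Tip:", "engagement_tip"),
--     ("Mobile Optimization Tip:", "mobile_tip"),
-- ]
--
--
-- def _parse_segment(seg):
--     d = {}
--     for line in seg:
--         for prefix, key in _TABLE: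
--             if line.startswith(prefix):
--                 d[key] = line.split(":", 1)[1].strip()
--                 break
--     return d
--
--
-- def parse_multimedia_block(block: str) -> list:
--     # Phase 1: cut the lines into record segments, a new segment at every "Type:" line.
--     segs = []
--     cur = []
--     for line in block.strip().split("\n"):
--         if line.startswith("Type:"):
--             segs.append(cur)
--             cur = [line]
--         else:
--             cur.append(line)
--     segs.append(cur)
--     # Phase 2: parse each segment via the prefix table, dropping empty records.
--     return [d for d in map(_parse_segment, segs) if d]
-- ===== Notes on version B (the rewrite author's own statement) =====
-- stated objective: alternative
-- what changed: Replaces A's single interleaved flush-and-accumulate loop over the lines with a two-phase decomposition: first cut the lines into record segments at every 'Type:' line, then parse each segment through a prefix-to-key table and drop empty records.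
import Mathlib
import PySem

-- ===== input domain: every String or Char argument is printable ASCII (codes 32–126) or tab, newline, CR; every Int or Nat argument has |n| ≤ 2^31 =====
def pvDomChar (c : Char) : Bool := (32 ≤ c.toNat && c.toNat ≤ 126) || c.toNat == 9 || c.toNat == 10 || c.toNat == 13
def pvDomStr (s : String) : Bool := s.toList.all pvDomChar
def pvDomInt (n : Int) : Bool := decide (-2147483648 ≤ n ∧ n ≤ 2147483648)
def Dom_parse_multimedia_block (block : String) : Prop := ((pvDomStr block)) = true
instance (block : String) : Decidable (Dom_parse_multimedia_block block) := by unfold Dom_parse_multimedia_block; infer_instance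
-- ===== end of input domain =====

-- B replaces A's interleaved flush-and-accumulate loop by two phases — cut the lines into record
-- segments at each "Type:" line, then parse each segment through a prefix→key table (objective: alternative).

-- ===== PORT A =====
-- line.split(":", 1)[1].strip(); every line this is applied to starts with a prefix containing
-- ':', so index 1 exists and pyGetD is exact there.
def pvVal (line : String) : String :=
  PySem.Str.strip (PySem.List.pyGetD ((PySem.Str.splitMax? line ":" 1).getD []) 1 "")

def pvStepA (st : List (PySem.Dict String String) × PySem.Dict String String) (line : String) :
    List (PySem.Dict String String) × PySem.Dict String String :=
  if PySem.Str.startswith line "Type:" then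
    let st' := if st.2.items ≠ [] then (st.1 ++ [st.2], PySem.Dict.empty) else st
    (st'.1, st'.2.insert "type" (pvVal line))
  else if PySem.Str.startswith line "Title:" then (st.1, st.2.insert "title" (pvVal line))
  else if PySem.Str.startswith line "Concept:" then (st.1, st.2.insert "concept" (pvVal line))
  else if PySem.Str.startswith line "Engagement Tip:" then (st.1, st.2.insert "engagement_tip" (pvVal line))
  else if PySem.Str.startswith line "Mobile Optimization Tip:" then (st.1, st.2.insert "mobile_tip" (pvVal line))
  else st

def parse_multimedia_block (block : String) : List (List (String × String)) :=
  let lines := (PySem.Str.split? (PySem.Str.strip block) "\n").getD []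
  let st := lines.foldl pvStepA ([], PySem.Dict.empty)
  let assets := if st.2.items ≠ [] then st.1 ++ [st.2] else st.1
  assets.map (fun d => d.items)

-- ===== PORT B =====
def pvTable : List (String × String) :=
  [("Type:", "type"), ("Title:", "title"), ("Concept:", "concept"),
   ("Engagement Tip:", "engagement_tip"), ("Mobile Optimization Tip:", "mobile_tip")]

def pvApplyTable : List (String × String) → PySem.Dict String String → String → PySem.Dict String String
  | [], d, _ => d
  | (p, k) :: rest, d, line =>
    if PySem.Str.startswith line p then d.insert k (pvVal line) else pvApplyTable rest d line

def pvParseSeg (seg : List String) : PySem.Dict String String :=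
  seg.foldl (fun d line => pvApplyTable pvTable d line) PySem.Dict.empty

def pvStepB (st : List (List String) × List String) (line : String) :
    List (List String) × List String :=
  if PySem.Str.startswith line "Type:" then (st.1 ++ [st.2], [line]) else (st.1, st.2 ++ [line])

def parse_multimedia_block_alt (block : String) : List (List (String × String)) :=
  let lines := (PySem.Str.split? (PySem.Str.strip block) "\n").getD []
  let st := lines.foldl pvStepB (([] : List (List String)), ([] : List String))
  let segs := st.1 ++ [st.2]
  (((segs.map pvParseSeg).filter (fun d => d.items ≠ [])).map (fun d => d.items))

-- ===== PRECONDITION & SPEC =====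
def Spec_parse_multimedia_block (block : String) (out : List (List (String × String))) : Prop := out = parse_multimedia_block_alt block
instance (block : String) (out : List (List (String × String))) : Decidable (Spec_parse_multimedia_block block out) := by unfold Spec_parse_multimedia_block; infer_instance

-- ===== CLAIM (what is proved, stated in full; the proofs are below) =====
def Claim_equal_parse_multimedia_block : Prop := ∀ (block : String), Dom_parse_multimedia_block block → Spec_parse_multimedia_block block (parse_multimedia_block block)

-- ===== LEMMAS AND PROOFS =====

-- trailing flush of A's loop state
def pvFinishA (st : List (PySem.Dict String String) × PySem.Dict String String) :
    List (PySem.Dict String String) :=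
  if st.2.items ≠ [] then st.1 ++ [st.2] else st.1

-- parse every segment, keep the non-empty records
def pvFilterParsed (segs : List (List String)) : List (PySem.Dict String String) :=
  (segs.map pvParseSeg).filter (fun d => d.items ≠ [])

lemma filterParsed_append (xs ys : List (List String)) :
    pvFilterParsed (xs ++ ys) = pvFilterParsed xs ++ pvFilterParsed ys := by
  simp [pvFilterParsed]

-- A's per-line elif chain equals one pass through B's prefix table (non-"Type:" line).
lemma stepA_eq_table (a : List (PySem.Dict String String)) (c : PySem.Dict String String)
    (l : String) (h : PySem.Str.startswith l "Type:" = false) :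
    pvStepA (a, c) l = (a, pvApplyTable pvTable c l) := by
  simp only [pvStepA, pvApplyTable, pvTable]
  rw [h]
  simp only [Bool.false_eq_true, if_false]
  split_ifs <;> rfl

-- A's "Type:" branch: flush, then the fresh record is exactly B's parse of the one-line segment.
lemma stepA_type (a : List (PySem.Dict String String)) (c : PySem.Dict String String)
    (l : String) (h : PySem.Str.startswith l "Type:" = true) :
    pvStepA (a, c) l = ((if c.items ≠ [] then a ++ [c] else a), pvParseSeg [l]) := by
  simp only [pvStepA, pvParseSeg, List.foldl, pvApplyTable, pvTable]
  rw [h]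
  by_cases hc : c.items = []
  · have hce : c = PySem.Dict.empty := by cases c; simp_all [PySem.Dict.empty]
    simp [hce, PySem.Dict.empty]
  · simp [hc]

lemma stepB_type (segs : List (List String)) (cur : List String)
    (l : String) (h : PySem.Str.startswith l "Type:" = true) :
    pvStepB (segs, cur) l = (segs ++ [cur], [l]) := by
  simp only [pvStepB]; rw [h]; simp

lemma stepB_other (segs : List (List String)) (cur : List String)
    (l : String) (h : PySem.Str.startswith l "Type:" = false) :
    pvStepB (segs, cur) l = (segs, cur ++ [l]) := by
  simp only [pvStepB]; rw [h]; simp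

lemma parseSeg_append (seg : List String) (l : String) :
    pvParseSeg (seg ++ [l]) = pvApplyTable pvTable (pvParseSeg seg) l := by
  simp [pvParseSeg]

-- main invariant: A's fold (then flush) from (assets, parse cur) equals B's segmentation fold
-- from (segs, cur), parsed and filtered — whenever assets is the filtered parse of segs.
lemma pv_main (lines : List String) :
    ∀ (assets : List (PySem.Dict String String)) (segs : List (List String)) (cur : List String),
      assets = pvFilterParsed segs →
      pvFinishA (lines.foldl pvStepA (assets, pvParseSeg cur)) =
      pvFilterParsed ((lines.foldl pvStepB (segs, cur)).1 ++ [(lines.foldl pvStepB (segs, cur)).2]) := by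
  induction lines with
  | nil =>
    intro assets segs cur ha
    simp only [List.foldl]
    rw [filterParsed_append, ← ha]
    simp only [pvFinishA, pvFilterParsed, List.map_cons, List.map_nil,
      List.filter_cons, List.filter_nil]
    split_ifs <;> simp_all
  | cons l ls ih =>
    intro assets segs cur ha
    simp only [List.foldl]
    by_cases h : PySem.Str.startswith l "Type:" = true
    · rw [stepA_type _ _ _ h, stepB_type _ _ _ h]
      refine ih _ _ [l] ?_
      rw [filterParsed_append, ← ha]
      simp only [pvFilterParsed, List.map_cons, List.map_nil, List.filter_cons, List.filter_nil]
      split_ifs <;> simp_all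
    · rw [stepA_eq_table _ _ _ (by simpa using h), stepB_other _ _ _ (by simpa using h),
        ← parseSeg_append]
      exact ih _ _ (cur ++ [l]) ha

-- ===== VERDICT (by name: the statement is the Claim_ definition above) =====
theorem parse_multimedia_block_spec : Claim_equal_parse_multimedia_block := by
  intro block _
  show parse_multimedia_block block = parse_multimedia_block_alt block
  simp only [parse_multimedia_block, parse_multimedia_block_alt]
  have h := pv_main ((PySem.Str.split? (PySem.Str.strip block) "\n").getD []) [] [] [] rfl
  rw [show pvParseSeg [] = PySem.Dict.empty from rfl] at h
  simp only [pvFinishA, pvFilterParsed] at h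
  rw [h]
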